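-- pv_equiv track=rewrite | github.com/BigDaddyAman/webhook-catcher | app/main.py | highlight_search_matches
-- ===== SOURCE A (Python) =====
-- def highlight_search_matches(text: str, search: str) -> list:
--     """Find and highlight search matches in text"""
--     if not search:
--         return []
--
--     matches = []
--     try:
--         search_terms = search.lower().split()
--         text_lower = text.lower()
--
--         for term in search_terms:
--             start = 0
--             while True:
--                 pos = text_lower.find(term, start)
--                 if pos == -1:
--                     break
--
--                 context_start = max(0, pos - 20)
--                 context_end = min(len(text), pos + len(term) + 20)
--
--                 matches.append({
--                     "term": term,
--                     "context": f"...{text[context_start:context_end]}..."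
--                 })
--
--                 start = pos + len(term)
--
--         return matches
--     except:
--         return []
-- ===== SOURCE B (Python) =====
-- def highlight_search_matches(text: str, search: str) -> list:
--     """Find and highlight search matches in text (find-all positions, then greedy non-overlap filter)."""
--     if not search:
--         return []
--     text_lower = text.lower()
--     n = len(text)
--     matches = []
--     for term in search.lower().split():
--         k = len(term)
--         positions = [i for i in range(n + 1 - k) if text_lower[i:i + k] == term]
--         last_end = 0
--         for p in positions:
--             if p >= last_end:
--                 matches.append({
--                     "term": term,
--                     "context": "..." + text[max(0, p - 20):min(n, p + k + 20)] + "..."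
--                 })
--                 last_end = p + k
--     return matches
-- ===== Notes on version B (the rewrite author's own statement) =====
-- stated objective: alternative
-- what changed: A's incremental find/advance while-loop per term is replaced by first enumerating all occurrence positions of the term with a slice-comparison scan and then keeping them with a greedy non-overlap fold over (matches, last_end).
import Mathlib
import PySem

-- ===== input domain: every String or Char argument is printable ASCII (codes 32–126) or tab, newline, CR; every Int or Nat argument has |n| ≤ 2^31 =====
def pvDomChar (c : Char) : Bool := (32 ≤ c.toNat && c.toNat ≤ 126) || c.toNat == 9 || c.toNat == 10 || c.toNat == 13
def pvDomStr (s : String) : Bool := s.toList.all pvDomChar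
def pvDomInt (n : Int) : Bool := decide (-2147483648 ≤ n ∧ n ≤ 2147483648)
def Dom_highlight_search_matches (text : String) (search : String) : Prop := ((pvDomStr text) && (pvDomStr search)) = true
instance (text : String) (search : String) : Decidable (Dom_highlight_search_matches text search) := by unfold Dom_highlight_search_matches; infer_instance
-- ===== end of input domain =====

-- B replaces A's incremental find/advance while-loop by "list all occurrence positions,
-- then keep them greedily non-overlapping" (objective: alternative; return value only,
-- neither program mutates anything; A's try/except is dead — nothing in the body raises).

-- ===== PORT A =====
-- A-side helper: the `while True: pos = text_lower.find(term, start) …` loop.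
-- `fuel` only makes the recursion total: each taken iteration advances `start` by
-- len(term) ≥ 1 (terms from split() are nonempty), so fuel = len(text_lower)+1 is never exhausted.
def pvAFind (text textLower term : List Char) (fuel : Nat) (start : Nat)
    (acc : List (List (String × String))) : List (List (String × String)) :=
  match fuel with
  | 0 => acc
  | fuel + 1 =>
    let pos := PySem.Chars.findFrom textLower term (start : Int)
    if pos = -1 then acc
    else
      let contextStart : Int := max 0 (pos - 20)
      let contextEnd : Int := min (text.length : Int) (pos + term.length + 20)
      pvAFind text textLower term fuel (pos + (term.length : Int)).toNat
        (acc ++ [[("term", String.ofList term),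
                  ("context", String.ofList ("...".toList ++
                    PySem.List.slice text (some contextStart) (some contextEnd) ++ "...".toList))]])

def highlight_search_matches (text : String) (search : String) : List (List (String × String)) :=
  if search.toList.isEmpty then []
  else
    let searchTerms := PySem.Chars.split₀ (PySem.Chars.lower search.toList)
    let textLower := PySem.Chars.lower text.toList
    searchTerms.foldl
      (fun ms term => pvAFind text.toList textLower term (textLower.length + 1) 0 ms) []

-- ===== PORT B =====
-- B-side helper: one term — collect all occurrence positions, then the greedy
-- non-overlap filter fold with state (matches, last_end).
def pvBTerm (text textLower term : List Char) (ms : List (List (String × String))) :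
    List (List (String × String)) :=
  let n := text.length
  let k := term.length
  let positions := (List.range (n + 1 - k)).filter
    (fun (i : Nat) => PySem.List.slice textLower (some (i : Int)) (some ((i : Int) + (k : Int))) == term)
  (positions.foldl
    (fun (st : List (List (String × String)) × Nat) (p : Nat) =>
      if st.2 ≤ p then
        (st.1 ++ [[("term", String.ofList term),
                   ("context", String.ofList ("...".toList ++
                     PySem.List.slice text (some (max 0 ((p : Int) - 20)))
                       (some (min (n : Int) ((p : Int) + (k : Int) + 20))) ++ "...".toList))]],
         p + k)
      else st) (ms, 0)).1

def highlight_search_matches_alt (text : String) (search : String) : List (List (String × String)) :=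
  if search.toList.isEmpty then []
  else
    let textLower := PySem.Chars.lower text.toList
    (PySem.Chars.split₀ (PySem.Chars.lower search.toList)).foldl
      (fun ms term => pvBTerm text.toList textLower term ms) []

-- ===== PRECONDITION & SPEC =====
def Spec_highlight_search_matches (text : String) (search : String) (out : List (List (String × String))) : Prop := out = highlight_search_matches_alt text search
instance (text : String) (search : String) (out : List (List (String × String))) : Decidable (Spec_highlight_search_matches text search out) := by unfold Spec_highlight_search_matches; infer_instance

-- ===== CLAIM (what is proved, stated in full; the proofs are below) =====
def Claim_equal_highlight_search_matches : Prop := ∀ (text : String) (search : String), Dom_highlight_search_matches text search → Spec_highlight_search_matches text search (highlight_search_matches text search)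

-- ===== LEMMAS AND PROOFS =====

-- every word produced by str.split() is nonempty
lemma split₀_go_ne_nil : ∀ (s cur : List Char) (acc : List (List Char)),
    (∀ t ∈ acc, t ≠ []) → ∀ t ∈ PySem.Chars.split₀.go s cur acc, t ≠ [] := by
  intro s
  induction s with
  | nil =>
    intro cur acc hacc t ht
    simp only [PySem.Chars.split₀.go] at ht
    split at ht
    · exact hacc t (List.mem_reverse.mp ht)
    · rename_i hcur2
      rcases List.mem_cons.mp (List.mem_reverse.mp ht) with h | h
      · subst h
        simpa using List.isEmpty_eq_false_iff.mp (by simpa using hcur2)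
      · exact hacc t h
  | cons c rest ih =>
    intro cur acc hacc t ht
    simp only [PySem.Chars.split₀.go] at ht
    split at ht
    · split at ht
      · exact ih [] acc hacc t ht
      · refine ih [] _ ?_ t ht
        intro u hu
        rcases List.mem_cons.mp hu with h | h
        · subst h
          rename_i hc hcur2
          simpa using List.isEmpty_eq_false_iff.mp (by simpa using hcur2)
        · exact hacc u h
    · exact ih (c :: cur) acc hacc t ht

lemma mem_split₀_ne_nil {s t : List Char} (h : t ∈ PySem.Chars.split₀ s) : t ≠ [] := by
  unfold PySem.Chars.split₀ at h
  exact split₀_go_ne_nil s [] [] (by simp) t h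

-- core: the greedy fold over all occurrence positions equals A's find/advance loop
lemma greedy_eq (text textLower term : List Char)
    (hterm : term ≠ []) :
    ∀ (P : List Nat) (start fuel : Nat) (acc : List (List (String × String))),
      P.Pairwise (· < ·) →
      (∀ p ∈ P, term <+: textLower.drop p) →
      (∀ i, term <+: textLower.drop i → i ∈ P ∨ i < start) →
      start ≤ textLower.length →
      P.length ≤ fuel →
      (P.foldl
        (fun (st : List (List (String × String)) × Nat) (p : Nat) =>
          if st.2 ≤ p then
            (st.1 ++ [[("term", String.ofList term),
                       ("context", String.ofList ("...".toList ++
                         PySem.List.slice text (some (max 0 ((p : Int) - 20)))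
                           (some (min ((text.length : Nat) : Int) ((p : Int) + (term.length : Int) + 20))) ++ "...".toList))]],
             p + term.length)
          else st) (acc, start)).1
        = pvAFind text textLower term fuel start acc := by
  intro P
  induction P with
  | nil =>
    intro start fuel acc _ _ hcomp hstart _
    simp only [List.foldl_nil]
    cases fuel with
    | zero => rfl
    | succ fuel =>
      have hneg : PySem.Chars.findFrom textLower term (start : Int) = -1 := by
        rw [PySem.Chars.findFrom_natCast_eq_neg_one_iff textLower term start hstart]
        intro hinf
        obtain ⟨j, hj⟩ := (PySem.Chars.exists_prefix_drop_iff_isIn term _).mpr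
          ((PySem.Chars.isIn_iff_infix term _).mpr hinf)
        rw [List.drop_drop] at hj
        rcases hcomp _ hj with h | h
        · simp at h
        · omega
      simp [pvAFind, hneg]
  | cons p tl ih =>
    intro start fuel acc hpw hocc hcomp hstart hfuel
    have hoccp : term <+: textLower.drop p := hocc p (by simp)
    have hk1 : 1 ≤ term.length := List.length_pos_iff.mpr hterm
    rw [List.foldl_cons]
    by_cases hp : start ≤ p
    · -- this position is taken: it is exactly what A's find returns
      have hpkn : p + term.length ≤ textLower.length := by
        have := hoccp.length_le
        rw [List.length_drop] at this
        omega
      have hfind : PySem.Chars.findFrom textLower term (start : Int) = (p : Int) := by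
        have hinf : term <:+: textLower.drop start := by
          refine (PySem.Chars.isIn_iff_infix term _).mp
            ((PySem.Chars.exists_prefix_drop_iff_isIn term _).mp ⟨p - start, ?_⟩)
          rw [List.drop_drop]
          have hps : start + (p - start) = p := by omega
          rw [hps]
          exact hoccp
        have hne : PySem.Chars.findFrom textLower term (start : Int) ≠ -1 := by
          intro h
          exact (PySem.Chars.findFrom_natCast_eq_neg_one_iff textLower term start hstart).mp h hinf
        obtain ⟨hge, hpre, hmin⟩ := PySem.Chars.findFrom_natCast_spec textLower term start hstart hne
        set r := PySem.Chars.findFrom textLower term (start : Int) with hr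
        have hr0 : 0 ≤ r := le_trans (by omega) hge
        have hrs : start ≤ r.toNat := by omega
        have hrp : r.toNat = p := by
          rcases hcomp r.toNat hpre with hin | hlt
          · rcases List.mem_cons.mp hin with h | h
            · exact h
            · exact absurd hoccp (hmin p hp ((List.pairwise_cons.mp hpw).1 _ h))
          · omega
        omega
      cases fuel with
      | zero => simp at hfuel
      | succ fuel =>
        simp only [pvAFind, hfind]
        rw [if_neg (by omega : ¬ ((p : Int) = -1))]
        have htn : ((p : Int) + (term.length : Int)).toNat = p + term.length := by omega
        rw [htn, if_pos hp]
        exact ih (p + term.length) fuel _ (List.pairwise_cons.mp hpw).2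
          (fun q hq => hocc q (List.mem_cons_of_mem _ hq))
          (fun i hi => by
            rcases hcomp i hi with hin | hlt
            · rcases List.mem_cons.mp hin with h | h
              · right; omega
              · left; exact h
            · right; omega)
          hpkn (by simpa using hfuel)
    · -- p < start: the greedy fold skips it (it overlaps an already-taken match)
      rw [if_neg hp]
      exact ih start fuel acc (List.pairwise_cons.mp hpw).2
        (fun q hq => hocc q (List.mem_cons_of_mem _ hq))
        (fun i hi => by
          rcases hcomp i hi with hin | hlt
          · rcases List.mem_cons.mp hin with h | h
            · right; omega
            · left; exact h
          · right; omega)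
        hstart (by simp at hfuel; omega)

-- per-term equality
lemma term_eq (text textLower term : List Char)
    (hlow : textLower = PySem.Chars.lower text) (hterm : term ≠ [])
    (acc : List (List (String × String))) :
    pvBTerm text textLower term acc
      = pvAFind text textLower term (textLower.length + 1) 0 acc := by
  have hlen : textLower.length = text.length := by
    rw [hlow]; simp [PySem.Chars.lower]
  have hk1 : 1 ≤ term.length := List.length_pos_iff.mpr hterm
  unfold pvBTerm
  refine greedy_eq text textLower term hterm
    ((List.range (text.length + 1 - term.length)).filter
      (fun i => PySem.List.slice textLower (some (i : Int)) (some ((i : Int) + (term.length : Int))) == term))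
    0 (textLower.length + 1) acc
    (List.pairwise_lt_range.filter _) ?_ ?_ (by omega) ?_
  · intro q hq
    obtain ⟨hr, hsl⟩ := List.mem_filter.mp hq
    have heq : PySem.List.slice textLower (some (q : Int)) (some ((q : Int) + (term.length : Int))) = term :=
      by simpa using hsl
    rw [PySem.List.slice_natCast_add] at heq
    exact List.prefix_iff_eq_take.mpr heq.symm
  · intro i hi
    left
    have hlen2 : i + term.length ≤ text.length := by
      have := hi.length_le
      rw [List.length_drop] at this
      omega
    refine List.mem_filter.mpr ⟨List.mem_range.mpr (by omega), ?_⟩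
    rw [PySem.List.slice_natCast_add]
    simpa using (List.prefix_iff_eq_take.mp hi).symm
  · exact le_trans (List.length_filter_le _ _) (by simp [List.length_range]; omega)

-- ===== VERDICT (by name: the statement is the Claim_ definition above) =====
theorem highlight_search_matches_spec : Claim_equal_highlight_search_matches := by
  intro text search _
  unfold Spec_highlight_search_matches highlight_search_matches highlight_search_matches_alt
  split
  · rfl
  · show List.foldl _ [] _ = List.foldl _ [] _
    exact PySem.List.foldl_congr_mem (PySem.Chars.split₀ (PySem.Chars.lower search.toList)) _ _ []
      (fun acc term hmem => (term_eq text.toList _ term rfl (mem_split₀_ne_nil hmem) acc).symm)
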